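-- pv_equiv track=rewrite | github.com/queelius/computational-explorations | src/new_attacks.py | greedy_b2_sequence
-- ===== SOURCE A (Python) =====
-- from typing import Set, List, Tuple, Dict, Optional
--
-- def greedy_b2_sequence(N: int) -> Set[int]:
--     """Construct B2 (Sidon) sequence greedily up to N. OEIS A005282."""
--     A = set()
--     sums = set()
--     for x in range(1, N + 1):
--         new_sums = set()
--         conflict = False
--         for a in A:
--             s = a + x
--             if s in sums:
--                 conflict = True
--                 break
--             new_sums.add(s)
--         if not conflict:
--             double = 2 * x
--             if double not in sums:
--                 new_sums.add(double)
--                 A.add(x)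
--                 sums |= new_sums
--     return A
-- ===== SOURCE B (Python) =====
-- def greedy_b2_sequence(N: int):
--     """Greedy B2 (Sidon) sequence up to N (OEIS A005282), via bitmasks:
--     bit i of a_mask marks i a member, bit i of sums_mask marks i a pairwise
--     sum.  Candidate x would introduce the sums {a + x : a member} and {2x},
--     i.e. the mask (a_mask << x) | (1 << 2*x); x is accepted iff none of
--     those sums is already taken."""
--     members = set()
--     a_mask = 0
--     sums_mask = 0
--     for x in range(1, N + 1):
--         new = (a_mask << x) | (1 << (2 * x))
--         if new & sums_mask == 0:
--             members.add(x)
--             a_mask |= 1 << x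
--             sums_mask |= new
--     return members
-- ===== Notes on version B (the rewrite author's own statement) =====
-- stated objective: alternative
-- what changed: Replaces A's explicit inner loop over the member set (with early break) and the staged new_sums set by big-integer bitmasks: one shift/OR builds the mask of all sums the candidate would introduce and a single AND against the sums mask decides acceptance, so the per-member scan disappears.
import Mathlib
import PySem

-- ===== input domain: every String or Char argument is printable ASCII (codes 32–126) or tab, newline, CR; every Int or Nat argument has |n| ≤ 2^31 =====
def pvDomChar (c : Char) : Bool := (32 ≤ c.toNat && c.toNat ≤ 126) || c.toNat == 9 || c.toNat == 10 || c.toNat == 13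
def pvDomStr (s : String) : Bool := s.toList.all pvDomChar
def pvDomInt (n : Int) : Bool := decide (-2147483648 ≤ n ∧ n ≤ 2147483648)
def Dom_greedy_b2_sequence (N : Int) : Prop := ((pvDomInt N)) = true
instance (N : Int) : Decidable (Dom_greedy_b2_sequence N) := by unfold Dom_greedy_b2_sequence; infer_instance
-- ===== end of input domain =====

-- B replaces A's explicit inner loop over the member set (with early break) and the staged
-- new_sums set by big-integer bitmasks: one shift/OR builds the mask of all sums the candidate
-- would introduce and a single AND decides acceptance; objective: alternative (not faster).

-- ===== PORT A =====
-- inner loop body: 'for a in A: s = a + x; if s in sums: conflict = True; break; new_sums.add(s)'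
-- (iterating the set A is order-independent here: the flag is an 'any' and a partial new_sums is discarded)
def b2InnerA (sums : PySem.Set Int) (x : Int) (acc : PySem.Set Int × Bool) (a : Int) :
    PySem.Set Int × Bool :=
  if acc.2 then acc            -- 'break': after a conflict the remaining elements are skipped
  else
    let s := a + x
    if PySem.Set.contains sums s then (acc.1, true)
    else (PySem.Set.add acc.1 s, false)

def b2StepA (st : PySem.Set Int × PySem.Set Int) (x : Int) : PySem.Set Int × PySem.Set Int :=
  let A := st.1
  let sums := st.2
  let inner := A.foldl (b2InnerA sums x) (PySem.Set.empty, false)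
  if inner.2 = false then
    let double := 2 * x
    if PySem.Set.contains sums double = false then
      (PySem.Set.add A x, PySem.Set.union sums (PySem.Set.add inner.1 double))
    else st
  else st

def greedy_b2_sequence (N : Int) : List Int :=
  ((PySem.List.pyRange 1 (N + 1) 1).foldl b2StepA (PySem.Set.empty, PySem.Set.empty)).1

-- ===== PORT B =====
-- state: (members, a_mask, sums_mask); x runs over range(1, N+1), so the Python shift
-- amounts x and 2*x are nonnegative and .toNat renders them exactly
def b2AltStep (st : PySem.Set Int × Nat × Nat) (x : Int) : PySem.Set Int × Nat × Nat :=
  let new := (st.2.1 <<< x.toNat) ||| (1 <<< (2 * x).toNat)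
  if new &&& st.2.2 = 0 then
    (PySem.Set.add st.1 x, st.2.1 ||| (1 <<< x.toNat), st.2.2 ||| new)
  else st

def greedy_b2_sequence_alt (N : Int) : List Int :=
  ((PySem.List.pyRange 1 (N + 1) 1).foldl b2AltStep (PySem.Set.empty, 0, 0)).1

-- ===== PRECONDITION & SPEC =====
def Spec_greedy_b2_sequence (N : Int) (out : List Int) : Prop := out = greedy_b2_sequence_alt N
instance (N : Int) (out : List Int) : Decidable (Spec_greedy_b2_sequence N out) := by unfold Spec_greedy_b2_sequence; infer_instance

-- ===== CLAIM (what is proved, stated in full; the proofs are below) =====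
def Claim_equal_greedy_b2_sequence : Prop := ∀ (N : Int), Dom_greedy_b2_sequence N → Spec_greedy_b2_sequence N (greedy_b2_sequence N)

-- ===== LEMMAS AND PROOFS =====

-- relation between A's state (A, sums) and B's state (members, a_mask, sums_mask),
-- after the candidates 1..p have been processed
def InvB2 (p : Int) (sa : PySem.Set Int × PySem.Set Int)
    (sb : PySem.Set Int × Nat × Nat) : Prop :=
  sb.1 = sa.1 ∧
  (∀ b ∈ sa.1, 1 ≤ b ∧ b ≤ p) ∧
  (∀ j : Nat, sb.2.1.testBit j = true ↔ (j : Int) ∈ sa.1) ∧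
  (∀ j : Nat, sb.2.2.testBit j = true ↔ (j : Int) ∈ sa.2)

theorem b2InnerA_stuck (sums : PySem.Set Int) (x : Int) (l : List Int) (ns : PySem.Set Int) :
    l.foldl (b2InnerA sums x) (ns, true) = (ns, true) := by
  induction l with
  | nil => rfl
  | cons a l ih => simpa [b2InnerA] using ih

theorem b2InnerA_snd (sums : PySem.Set Int) (x : Int) (l : List Int) (ns : PySem.Set Int) :
    (l.foldl (b2InnerA sums x) (ns, false)).2
      = l.any (fun a => PySem.Set.contains sums (a + x)) := by
  induction l generalizing ns with
  | nil => rfl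
  | cons a l ih =>
    by_cases h : (a + x) ∈ sums
    · simp [b2InnerA, h, b2InnerA_stuck]
    · simp [b2InnerA, h, ih]

theorem b2InnerA_fst_of_no (sums : PySem.Set Int) (x : Int) (l : List Int) (ns : PySem.Set Int)
    (h : ∀ a ∈ l, (a + x) ∉ sums) :
    l.foldl (b2InnerA sums x) (ns, false)
      = (l.foldl (fun s a => PySem.Set.add s (a + x)) ns, false) := by
  induction l generalizing ns with
  | nil => rfl
  | cons a l ih =>
    have ha := h a (by simp)
    simp only [List.foldl_cons, b2InnerA]
    simp only [PySem.Set.contains_eq_listContains]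
    simp only [List.contains_eq_mem, decide_eq_true_eq] at *
    rw [if_neg (by simp), if_neg ha]
    exact ih _ (fun b hb => h b (by simp [hb]))

theorem mem_foldl_addx (x : Int) (l : List Int) (s : PySem.Set Int) (y : Int) :
    y ∈ l.foldl (fun s a => PySem.Set.add s (a + x)) s ↔ y ∈ s ∨ ∃ a ∈ l, y = a + x := by
  induction l generalizing s with
  | nil => simp
  | cons b l ih =>
    rw [List.foldl_cons, ih, PySem.Set.mem_add]
    simp only [List.mem_cons]
    constructor
    · rintro ((hs | rfl) | ⟨a, ha, rfl⟩)
      · exact Or.inl hs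
      · exact Or.inr ⟨b, Or.inl rfl, rfl⟩
      · exact Or.inr ⟨a, Or.inr ha, rfl⟩
    · rintro (hs | ⟨a, (rfl | ha), rfl⟩)
      · exact Or.inl (Or.inl hs)
      · exact Or.inl (Or.inr rfl)
      · exact Or.inr ⟨a, ha, rfl⟩

theorem b2Step_equiv (x : Int) (hx : 1 ≤ x)
    (sa : PySem.Set Int × PySem.Set Int)
    (sb : PySem.Set Int × Nat × Nat)
    (h : InvB2 (x - 1) sa sb) : InvB2 x (b2StepA sa x) (b2AltStep sb x) := by
  obtain ⟨hset, hbnd, hA, hS⟩ := h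
  -- the bits of B's candidate mask 'new'
  have hnew : ∀ j : Nat,
      ((sb.2.1 <<< x.toNat) ||| (1 <<< (2 * x).toNat)).testBit j = true
        ↔ ((∃ a ∈ sa.1, (j : Int) = a + x) ∨ (j : Int) = 2 * x) := by
    intro j
    rw [Nat.testBit_or, Bool.or_eq_true, Nat.testBit_shiftLeft,
      show (1 <<< (2 * x).toNat) = 2 ^ ((2 * x).toNat) by simp [Nat.shiftLeft_eq],
      Nat.testBit_two_pow]
    constructor
    · rintro (h1 | h2)
      · rw [Bool.and_eq_true, decide_eq_true_eq] at h1
        obtain ⟨hle, hbit⟩ := h1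
        have hmem := (hA _).mp hbit
        exact Or.inl ⟨_, hmem, by omega⟩
      · rw [decide_eq_true_eq] at h2
        right; omega
    · rintro (⟨a, ha, hj⟩ | hj)
      · left
        have ha1 := (hbnd a ha).1
        rw [Bool.and_eq_true, decide_eq_true_eq]
        refine ⟨by omega, ?_⟩
        rw [hA, show ((j - x.toNat : Nat) : Int) = a by omega]
        exact ha
      · right
        rw [decide_eq_true_eq]
        omega
  -- B's acceptance test ↔ A's acceptance condition
  have hacc_iff : ((sb.2.1 <<< x.toNat) ||| (1 <<< (2 * x).toNat)) &&& sb.2.2 = 0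
      ↔ ((∀ a ∈ sa.1, (a + x) ∉ sa.2) ∧ (2 * x) ∉ sa.2) := by
    constructor
    · intro h0
      constructor
      · intro a ha hmem
        have ha1 := (hbnd a ha).1
        have hbn : ((sb.2.1 <<< x.toNat) ||| (1 <<< (2 * x).toNat)).testBit (a + x).toNat
            = true := (hnew _).mpr (Or.inl ⟨a, ha, by omega⟩)
        have hbs : sb.2.2.testBit (a + x).toNat = true := by
          rw [hS, show (((a + x).toNat : Int)) = a + x by omega]
          exact hmem
        have : ((((sb.2.1 <<< x.toNat) ||| (1 <<< (2 * x).toNat)) &&& sb.2.2)).testBit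
            (a + x).toNat = true := by
          rw [Nat.testBit_and, hbn, hbs]; rfl
        rw [h0, Nat.zero_testBit] at this
        exact Bool.false_ne_true this
      · intro hmem
        have hbn : ((sb.2.1 <<< x.toNat) ||| (1 <<< (2 * x).toNat)).testBit (2 * x).toNat
            = true := (hnew _).mpr (Or.inr (by omega))
        have hbs : sb.2.2.testBit (2 * x).toNat = true := by
          rw [hS, show (((2 * x).toNat : Int)) = 2 * x by omega]
          exact hmem
        have : ((((sb.2.1 <<< x.toNat) ||| (1 <<< (2 * x).toNat)) &&& sb.2.2)).testBit
            (2 * x).toNat = true := by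
          rw [Nat.testBit_and, hbn, hbs]; rfl
        rw [h0, Nat.zero_testBit] at this
        exact Bool.false_ne_true this
    · rintro ⟨h1, h2⟩
      apply Nat.eq_of_testBit_eq
      intro j
      rw [Nat.testBit_and, Nat.zero_testBit]
      by_cases hb : ((sb.2.1 <<< x.toNat) ||| (1 <<< (2 * x).toNat)).testBit j = true
      · rcases (hnew j).mp hb with ⟨a, ha, hj⟩ | hj
        · have : sb.2.2.testBit j = false := by
            rw [← Bool.not_eq_true, hS, hj]
            exact h1 a ha
          simp [this]
        · have : sb.2.2.testBit j = false := by
            rw [← Bool.not_eq_true, hS, hj]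
            exact h2
          simp [this]
      · rw [Bool.not_eq_true] at hb
        simp [hb]
  -- A's conflict flag
  have hflag : (sa.1.foldl (b2InnerA sa.2 x) (PySem.Set.empty, false)).2 = false
      ↔ ∀ a ∈ sa.1, (a + x) ∉ sa.2 := by
    rw [b2InnerA_snd]
    simp
  by_cases hacc : (∀ a ∈ sa.1, (a + x) ∉ sa.2) ∧ (2 * x) ∉ sa.2
  · -- accepted on both sides
    obtain ⟨hall, hdb⟩ := hacc
    have hinner := b2InnerA_fst_of_no sa.2 x sa.1 PySem.Set.empty hall
    have hdb' : PySem.Set.contains sa.2 (2 * x) = false := by simpa using hdb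
    have hB0 : ((sb.2.1 <<< x.toNat) ||| (1 <<< (2 * x).toNat)) &&& sb.2.2 = 0 :=
      hacc_iff.mpr ⟨hall, hdb⟩
    simp only [b2StepA, b2AltStep, hinner, hB0, if_true, hdb']
    refine ⟨by rw [hset], ?_, ?_, ?_⟩
    · intro b hb
      rw [PySem.Set.mem_add] at hb
      rcases hb with hb | rfl
      · have := hbnd b hb; omega
      · omega
    · intro j
      rw [Nat.testBit_or, Bool.or_eq_true,
        show (1 <<< x.toNat) = 2 ^ x.toNat by simp [Nat.shiftLeft_eq],
        Nat.testBit_two_pow, PySem.Set.mem_add, hA]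
      constructor
      · rintro (hj | hj)
        · exact Or.inl hj
        · rw [decide_eq_true_eq] at hj
          right; omega
      · rintro (hj | hj)
        · exact Or.inl hj
        · right
          rw [decide_eq_true_eq]
          omega
    · intro j
      rw [Nat.testBit_or, Bool.or_eq_true, hS, hnew, PySem.Set.mem_union, PySem.Set.mem_add,
        mem_foldl_addx]
      constructor
      · rintro (hj | (⟨a, ha, hj⟩ | hj))
        · exact Or.inl hj
        · exact Or.inr (Or.inl (Or.inr ⟨a, ha, hj⟩))
        · exact Or.inr (Or.inr hj)
      · rintro (hj | ((hj | ⟨a, ha, hj⟩) | hj))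
        · exact Or.inl hj
        · exact absurd hj (List.not_mem_nil)
        · exact Or.inr (Or.inl ⟨a, ha, hj⟩)
        · exact Or.inr (Or.inr hj)
  · -- rejected on both sides: both states unchanged
    have hB : b2AltStep sb x = sb := by
      simp only [b2AltStep]
      rw [if_neg (fun h0 => hacc (hacc_iff.mp h0))]
    rw [hB]
    have hstA : b2StepA sa x = sa := by
      simp only [b2StepA]
      by_cases hflag2 : (sa.1.foldl (b2InnerA sa.2 x) (PySem.Set.empty, false)).2 = false
      · rw [if_pos hflag2]
        have hdbT : (2 * x) ∈ sa.2 := by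
          by_contra hdb
          exact hacc ⟨hflag.mp hflag2, hdb⟩
        rw [if_neg (by simp [hdbT])]
      · rw [if_neg hflag2]
    rw [hstA]
    exact ⟨hset, fun b hb => by have := hbnd b hb; omega, hA, hS⟩

theorem b2Fold_inv (N : Int) : ∀ (n : Nat) (a : Int)
    (sa : PySem.Set Int × PySem.Set Int)
    (sb : PySem.Set Int × Nat × Nat),
    1 ≤ a → (N + 1 - a).toNat = n → InvB2 (a - 1) sa sb →
    ∃ p, InvB2 p ((PySem.List.pyRange a (N + 1) 1).foldl b2StepA sa)
      ((PySem.List.pyRange a (N + 1) 1).foldl b2AltStep sb) := by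
  intro n
  induction n with
  | zero =>
    intro a sa sb ha hn h
    have hempty : PySem.List.pyRange a (N + 1) 1 = [] := by
      rw [PySem.List.pyRange_one, hn]
      rfl
    rw [hempty]
    exact ⟨a - 1, h⟩
  | succ n ih =>
    intro a sa sb ha hn h
    have hlt : a < N + 1 := by omega
    rw [PySem.List.pyRange_one_cons hlt]
    simp only [List.foldl_cons]
    have hstep := b2Step_equiv a ha sa sb h
    have heq : a + 1 - 1 = a := by ring
    exact ih (a + 1) _ _ (by omega) (by omega) (by rw [heq]; exact hstep)

-- ===== VERDICT (by name: the statement is the Claim_ definition above) =====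
theorem greedy_b2_sequence_spec : Claim_equal_greedy_b2_sequence := by
  intro N _
  unfold Spec_greedy_b2_sequence greedy_b2_sequence greedy_b2_sequence_alt
  obtain ⟨p, hinv⟩ := b2Fold_inv N (N + 1 - 1).toNat 1
    (PySem.Set.empty, PySem.Set.empty) (PySem.Set.empty, 0, 0) le_rfl rfl
    (by
      refine ⟨rfl, ?_, ?_, ?_⟩
      · intro b hb
        exact absurd hb (List.not_mem_nil)
      · intro j
        rw [Nat.zero_testBit]
        constructor
        · intro hy
          exact absurd hy Bool.false_ne_true
        · intro hy
          exact absurd hy (List.not_mem_nil)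
      · intro j
        rw [Nat.zero_testBit]
        constructor
        · intro hy
          exact absurd hy Bool.false_ne_true
        · intro hy
          exact absurd hy (List.not_mem_nil))
  obtain ⟨hmem, -⟩ := hinv
  exact hmem.symm
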